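-- pv_equiv track=rewrite | github.com/jamesben6688/coding | swipe_line/车辆进出.py | car_count_at_times
-- ===== SOURCE A (Python) =====
-- from collections import defaultdict
--
-- def car_count_at_times(records, t):
--     # 事件字典，记录每个时间点的增减
--     events = defaultdict(int)
--
--     # 处理所有车辆的进出时间
--     for enter, exit in records:
--         events[enter] += 1  # 车辆进入
--         events[exit] -= 1  # 车辆退出
--
--     # 计算从0到t每个时刻的车辆数
--     result = []
--     current_count = 0
--     for time in range(t + 1):
--         current_count += events[time]
--         result.append(current_count)
--
--     return result
-- ===== SOURCE B (Python) =====
-- def car_count_at_times(records, t):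
--     result = []
--     for time in range(t + 1):
--         total = 0
--         for enter, exit in records:
--             total += (0 <= enter <= time) - (0 <= exit <= time)
--         result.append(total)
--     return result
-- ===== Notes on version B (the rewrite author's own statement) =====
-- stated objective: alternative
-- what changed: Replaces A's events-defaultdict plus running prefix-sum pass by a direct recount: for each time in range(t+1), B scans all records once and sums the signed indicators (0<=enter<=time) - (0<=exit<=time).
import Mathlib
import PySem

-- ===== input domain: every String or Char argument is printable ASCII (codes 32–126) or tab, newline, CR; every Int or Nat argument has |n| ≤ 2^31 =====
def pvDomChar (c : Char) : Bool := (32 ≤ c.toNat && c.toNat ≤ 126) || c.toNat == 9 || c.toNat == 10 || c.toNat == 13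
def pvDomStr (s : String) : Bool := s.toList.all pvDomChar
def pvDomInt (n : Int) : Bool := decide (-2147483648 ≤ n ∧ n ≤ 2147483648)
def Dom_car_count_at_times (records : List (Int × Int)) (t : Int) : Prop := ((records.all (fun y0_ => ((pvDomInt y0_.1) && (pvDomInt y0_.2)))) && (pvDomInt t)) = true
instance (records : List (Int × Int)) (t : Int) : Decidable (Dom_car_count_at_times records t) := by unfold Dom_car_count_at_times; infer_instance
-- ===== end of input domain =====

-- B replaces A's events-dict + running prefix sum by a direct recount: for each
-- time in range(t+1) it scans all records and sums signed indicators (alternative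
-- decomposition, same task; B is O(n·t) vs A's O(n+t)).

-- ===== PORT A =====
def car_count_at_times (records : List (Int × Int)) (t : Int) : List Int :=
  -- events = defaultdict(int); events[enter] += 1; events[exit] -= 1
  let events : PySem.Dict Int Int :=
    records.foldl (fun d p =>
      let d1 := d.insert p.1 (d.getD p.1 0 + 1)
      d1.insert p.2 (d1.getD p.2 0 - 1)) PySem.Dict.empty
  -- result = []; current_count = 0; for time in range(t+1): …
  ((PySem.List.pyRange 0 (t + 1) 1).foldl
    (fun (st : Int × List Int) time =>
      let c := st.1 + events.getD time 0
      (c, st.2 ++ [c])) (0, ([] : List Int))).2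

-- ===== PORT B =====
def car_count_at_times_alt (records : List (Int × Int)) (t : Int) : List Int :=
  (PySem.List.pyRange 0 (t + 1) 1).map (fun time =>
    records.foldl (fun total p =>
      total + (if 0 ≤ p.1 ∧ p.1 ≤ time then (1 : Int) else 0)
            - (if 0 ≤ p.2 ∧ p.2 ≤ time then (1 : Int) else 0)) 0)

-- ===== PRECONDITION & SPEC =====
def Spec_car_count_at_times (records : List (Int × Int)) (t : Int) (out : List Int) : Prop := out = car_count_at_times_alt records t
instance (records : List (Int × Int)) (t : Int) (out : List Int) : Decidable (Spec_car_count_at_times records t out) := by unfold Spec_car_count_at_times; infer_instance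

-- ===== CLAIM (what is proved, stated in full; the proofs are below) =====
def Claim_equal_car_count_at_times : Prop := ∀ (records : List (Int × Int)) (t : Int), Dom_car_count_at_times records t → Spec_car_count_at_times records t (car_count_at_times records t)

-- ===== LEMMAS AND PROOFS =====

-- net event delta of the records at a single time point k
def evDelta (records : List (Int × Int)) (k : Int) : Int :=
  (records.map (fun p => (if p.1 = k then (1 : Int) else 0) - (if p.2 = k then 1 else 0))).sum

theorem evDelta_nil (k : Int) : evDelta [] k = 0 := rfl

theorem evDelta_cons (p : Int × Int) (rs : List (Int × Int)) (k : Int) :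
    evDelta (p :: rs) k
      = ((if p.1 = k then (1 : Int) else 0) - (if p.2 = k then 1 else 0)) + evDelta rs k := by
  simp [evDelta]

-- the events dict built by A's first loop holds exactly evDelta
theorem getD_events (records : List (Int × Int)) (d : PySem.Dict Int Int) (k : Int) :
    (records.foldl (fun d p =>
        let d1 := d.insert p.1 (d.getD p.1 0 + 1)
        d1.insert p.2 (d1.getD p.2 0 - 1)) d).getD k 0
      = d.getD k 0 + evDelta records k := by
  induction records generalizing d with
  | nil => simp [evDelta_nil]
  | cons p rs ih =>
    obtain ⟨a, b⟩ := p
    rw [List.foldl_cons, ih, evDelta_cons]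
    simp only [PySem.Dict.getD_insert]
    split_ifs <;> subst_vars <;> omega

theorem sum_map_neg_int {α : Type} (xs : List α) (f : α → Int) :
    (xs.map (fun x => -f x)).sum = -(xs.map f).sum := by
  induction xs with
  | nil => simp
  | cons a l ih => simp [ih]; ring

-- indicator sum over List.range
theorem sum_ind_range (x : Int) (n : Nat) :
    ((List.range n).map (fun (i : Nat) => if x = (i : Int) then (1 : Int) else 0)).sum
      = if 0 ≤ x ∧ x < (n : Int) then 1 else 0 := by
  induction n with
  | zero =>
    simp only [List.range_zero, List.map_nil, List.sum_nil]
    rw [if_neg (by omega)]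
  | succ m ih =>
    rw [List.range_succ, List.map_append, List.sum_append, ih]
    simp only [List.map_cons, List.map_nil, List.sum_cons, List.sum_nil]
    push_cast
    split_ifs <;> omega

-- indicator sum over the time range
theorem sum_ind_pyRange (x T : Int) :
    ((PySem.List.pyRange 0 (T + 1) 1).map (fun k => if x = k then (1 : Int) else 0)).sum
      = if 0 ≤ x ∧ x ≤ T then 1 else 0 := by
  rw [PySem.List.pyRange_one, List.map_map]
  have : ((fun k => if x = k then (1 : Int) else 0) ∘ fun k : Nat => (0 : Int) + ↑k)
      = fun (i : Nat) => if x = (i : Int) then (1 : Int) else 0 := by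
    funext i; simp
  rw [this, sum_ind_range]
  split_ifs <;> omega

-- summing the deltas over 0..T gives B's direct recount at time T
theorem sum_evDelta (records : List (Int × Int)) (T : Int) :
    ((PySem.List.pyRange 0 (T + 1) 1).map (fun k => evDelta records k)).sum
      = records.foldl (fun total p =>
          total + (if 0 ≤ p.1 ∧ p.1 ≤ T then (1 : Int) else 0)
                - (if 0 ≤ p.2 ∧ p.2 ≤ T then (1 : Int) else 0)) 0 := by
  induction records with
  | nil => simp [evDelta_nil]
  | cons p rs ih =>
    have hfun : (fun total (q : Int × Int) =>
        total + (if 0 ≤ q.1 ∧ q.1 ≤ T then (1 : Int) else 0)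
              - (if 0 ≤ q.2 ∧ q.2 ≤ T then (1 : Int) else 0))
        = fun total q =>
        total + ((if 0 ≤ q.1 ∧ q.1 ≤ T then (1 : Int) else 0)
              - (if 0 ≤ q.2 ∧ q.2 ≤ T then (1 : Int) else 0)) := by
      funext s q; ring
    have expand : ∀ l : List (Int × Int),
        l.foldl (fun total (q : Int × Int) =>
          total + (if 0 ≤ q.1 ∧ q.1 ≤ T then (1 : Int) else 0)
                - (if 0 ≤ q.2 ∧ q.2 ≤ T then (1 : Int) else 0)) 0
        = (l.map (fun q => (if 0 ≤ q.1 ∧ q.1 ≤ T then (1 : Int) else 0)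
                - (if 0 ≤ q.2 ∧ q.2 ≤ T then (1 : Int) else 0))).sum := by
      intro l; rw [hfun, PySem.List.foldl_add]; simp
    rw [expand] at ih ⊢
    simp only [List.map_cons, List.sum_cons]
    have hcons : (fun k => evDelta (p :: rs) k)
        = fun k => ((if p.1 = k then (1 : Int) else 0) - (if p.2 = k then 1 else 0))
            + evDelta rs k := by
      funext k; rw [evDelta_cons]
    rw [hcons, PySem.List.sum_map_add_int, ih]
    have hsub : (fun k => (if p.1 = k then (1 : Int) else 0) - (if p.2 = k then 1 else 0))
        = fun k => (if p.1 = k then (1 : Int) else 0) + (-(if p.2 = k then (1 : Int) else 0)) := by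
      funext k; ring
    rw [hsub, PySem.List.sum_map_add_int, sum_map_neg_int, sum_ind_pyRange, sum_ind_pyRange]
    ring

-- A's second loop, with general delta function g, produces the prefix-sum map
theorem loopA_eq (g : Int → Int) (n : Nat) :
    ((PySem.List.pyRange 0 (n : Int) 1).foldl
        (fun (st : Int × List Int) time =>
          let c := st.1 + g time
          (c, st.2 ++ [c])) (0, ([] : List Int)))
      = ((PySem.List.pyRange 0 (n : Int) 1).foldl (fun s k => s + g k) 0,
         (PySem.List.pyRange 0 (n : Int) 1).map (fun T =>
           (PySem.List.pyRange 0 (T + 1) 1).foldl (fun s k => s + g k) 0)) := by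
  induction n with
  | zero => simp
  | succ m ih =>
    have hcast : ((m + 1 : Nat) : Int) = (m : Int) + 1 := by push_cast; ring
    have hm : (0 : Int) ≤ (m : Int) := by positivity
    rw [hcast, PySem.List.pyRange_one_succ_right hm, List.foldl_append, List.foldl_append,
      List.map_append, ih]
    simp only [List.foldl_cons, List.foldl_nil, List.map_cons, List.map_nil]
    rw [PySem.List.pyRange_one_succ_right hm, List.foldl_append]
    simp

-- ===== VERDICT (by name: the statement is the Claim_ definition above) =====
theorem car_count_at_times_spec : Claim_equal_car_count_at_times := by
  intro records t _
  unfold Spec_car_count_at_times car_count_at_times car_count_at_times_alt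
  by_cases h : 0 ≤ t + 1
  · have hn : ((t + 1).toNat : Int) = t + 1 := by omega
    have hev : ∀ k : Int,
        (records.foldl (fun d p =>
            let d1 := d.insert p.1 (d.getD p.1 0 + 1)
            d1.insert p.2 (d1.getD p.2 0 - 1)) PySem.Dict.empty).getD k 0
          = evDelta records k := by
      intro k; rw [getD_events]; simp
    simp only [hev]
    calc ((PySem.List.pyRange 0 (t + 1) 1).foldl
            (fun (st : Int × List Int) time =>
              let c := st.1 + evDelta records time
              (c, st.2 ++ [c])) (0, ([] : List Int))).2
        = (PySem.List.pyRange 0 (t + 1) 1).map (fun T =>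
            (PySem.List.pyRange 0 (T + 1) 1).foldl (fun s k => s + evDelta records k) 0) := by
          rw [← hn, loopA_eq]
      _ = (PySem.List.pyRange 0 (t + 1) 1).map (fun time =>
            records.foldl (fun total p =>
              total + (if 0 ≤ p.1 ∧ p.1 ≤ time then (1 : Int) else 0)
                    - (if 0 ≤ p.2 ∧ p.2 ≤ time then (1 : Int) else 0)) 0) := by
          apply List.map_congr_left
          intro T _
          rw [PySem.List.foldl_add, ← sum_evDelta records T]
          simp
  · rw [PySem.List.pyRange_one_eq_nil (by omega)]
    simp
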